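-- pv_equiv track=rewrite | github.com/Mr-inception/GfG_October_Solved | GeeksforGeeks_Solutions/python/October_02.py | rotateDelete
-- ===== SOURCE A (Python) =====
-- def rotateDelete(arr):
--     var1 = 0
--     var2 = 0
--     var3 = len(arr)-1
--
--     while(len(arr) != 1):
--         x = arr[len(arr) - 1]
--         arr.insert (0, x)
--         arr.pop (len(arr) - 1)
--         y = var3 - var1 -var2
--         y = 0 if y<0 else y
--         arr.pop(y)
--         var1 += 1
--         var2 += 1
--     return arr[0]
-- ===== SOURCE B (Python) =====
-- def rotateDelete(arr):
--     # Track only the index (in the current list) of the eventual survivor,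
--     # replaying the deletions backwards over lengths m = 2..n: O(n) time, O(1) space.
--     n = len(arr)
--     j = 0
--     for m in range(2, n + 1):
--         y = 2 * m - n - 1
--         if y < 0:
--             y = 0
--         if j < y:
--             j = m - 1 if j == 0 else j - 1
--     return arr[j]
-- ===== Notes on version B (the rewrite author's own statement) =====
-- stated objective: faster
-- what changed: B never builds or mutates lists: it tracks only the survivor's index with an O(1)-space scalar recurrence replayed over lengths m=2..n, then indexes the input once, instead of A's physical rotate-insert-pop simulation; note A empties the caller's list in place while B leaves it untouched (return values are what is proved equal).
import Mathlib
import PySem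

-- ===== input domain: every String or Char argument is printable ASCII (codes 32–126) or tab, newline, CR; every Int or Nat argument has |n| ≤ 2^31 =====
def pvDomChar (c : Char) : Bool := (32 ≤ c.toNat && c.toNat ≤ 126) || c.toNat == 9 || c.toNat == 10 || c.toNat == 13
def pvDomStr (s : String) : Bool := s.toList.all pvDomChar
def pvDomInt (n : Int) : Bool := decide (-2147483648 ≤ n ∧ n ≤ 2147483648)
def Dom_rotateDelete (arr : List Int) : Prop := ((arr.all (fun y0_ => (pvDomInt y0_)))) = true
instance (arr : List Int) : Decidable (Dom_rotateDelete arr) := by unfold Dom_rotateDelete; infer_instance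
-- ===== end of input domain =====

-- B replaces A's O(n^2) rotate/insert/pop list simulation by an O(n) scalar recurrence on
-- the survivor's index (objective: faster). Python A empties its argument list in place,
-- B does not mutate it; the equivalence proved here is about the RETURN value only.

-- ===== PORT A =====
-- A's while-loop: rotate right by one (insert last at front, pop last), then pop index
-- y = max(var3 - var1 - var2, 0); var1, var2 each count iterations, var3 = len(arr)-1 fixed.
def rotLoop (arr : List Int) (v1 v2 v3 : Int) : Int :=
  if _h1 : arr.length = 1 then (PySem.List.pyGet? arr 0).getD 0   -- return arr[0]
  else if _h0 : arr = [] then 0    -- Python raises IndexError here (arr[len(arr)-1] on []); excluded by Pre_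
  else
    let x := arr.getLastD 0                       -- x = arr[len(arr)-1]
    let rotated := x :: arr.dropLast              -- arr.insert(0, x); arr.pop(len(arr)-1)
    let y : Int := if v3 - v1 - v2 < 0 then 0 else v3 - v1 - v2   -- y = var3 - var1 - var2; y = 0 if y < 0 else y
    if _hy : y.toNat < arr.length then            -- arr.pop(y); out-of-range pop would raise (len(rotated) = len(arr))
      rotLoop (rotated.eraseIdx y.toNat) (v1 + 1) (v2 + 1) v3
    else 0                                        -- Python raises IndexError; unreachable from rotateDelete
termination_by arr.length
decreasing_by
  have hne : arr.length ≠ 0 := fun h => _h0 (List.length_eq_zero_iff.mp h)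
  have h3 : arr.dropLast.length = arr.length - 1 := List.length_dropLast
  rw [List.length_eraseIdx, if_pos (by simp only [List.length_cons, h3]; omega)]
  simp only [List.length_cons, h3]
  omega

def rotateDelete (arr : List Int) : Int :=
  rotLoop arr 0 0 ((arr.length : Int) - 1)

-- ===== PORT B =====
-- One iteration of B's index recurrence: at current length m the deleted index was
-- y = max(2*m - n - 1, 0); pull the survivor's index j back through rotate+delete.
def altStep (n j m : Int) : Int :=
  let y0 := 2 * m - n - 1
  let y := if y0 < 0 then 0 else y0
  if j < y then (if j = 0 then m - 1 else j - 1) else j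

def rotateDelete_alt (arr : List Int) : Int :=
  let n : Int := arr.length
  let j := (PySem.List.pyRange 2 (n + 1) 1).foldl (altStep n) 0
  (PySem.List.pyGet? arr j).getD 0    -- return arr[j]; IndexError only for arr = [], excluded by Pre_

-- ===== PRECONDITION & SPEC =====
-- Pre_ excludes only the empty list, on which A raises IndexError (so does B).
def Pre_rotateDelete (arr : List Int) : Prop := arr ≠ []
instance (arr : List Int) : Decidable (Pre_rotateDelete arr) := by unfold Pre_rotateDelete; infer_instance
def pvWitness_rotateDelete : List Int := [3, 1, 4, 1, 5]
def Spec_rotateDelete (arr : List Int) (out : Int) : Prop := out = rotateDelete_alt arr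
instance (arr : List Int) (out : Int) : Decidable (Spec_rotateDelete arr out) := by unfold Spec_rotateDelete; infer_instance

-- ===== CLAIM (what is proved, stated in full; the proofs are below) =====
def Claim_equal_rotateDelete : Prop := ∀ (arr : List Int), Dom_rotateDelete arr → Pre_rotateDelete arr → Spec_rotateDelete arr (rotateDelete arr)

-- ===== LEMMAS AND PROOFS =====

-- Scalar form of B's fold: Jn n m = final index for a run of length m (loop m' = 2..m).
def Jn (n : Int) : Nat → Int
  | 0 => 0
  | 1 => 0
  | m + 2 => altStep n (Jn n (m + 1)) ((m : Int) + 2)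

theorem Jn_bounds (n : Int) : ∀ (m : Nat), 1 ≤ m → 0 ≤ Jn n m ∧ Jn n m ≤ (m : Int) - 1
  | 0, h => by omega
  | 1, _ => by simp [Jn]
  | (m + 2), _ => by
      have h := Jn_bounds n (m + 1) (by omega)
      simp only [Jn, altStep]
      push_cast
      split_ifs <;> omega

theorem fold_eq_Jn (n : Int) : ∀ (M : Nat), 1 ≤ M →
    (PySem.List.pyRange 2 ((M : Int) + 1) 1).foldl (altStep n) 0 = Jn n M
  | 0, h => by omega
  | 1, _ => by simp [PySem.List.pyRange, Jn]
  | (M + 2), _ => by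
      have ih := fold_eq_Jn n (M + 1) (by omega)
      have hsplit : (PySem.List.pyRange 2 (((M + 2 : Nat) : Int) + 1) 1)
          = PySem.List.pyRange 2 (((M + 1 : Nat) : Int) + 1) 1 ++ [((M + 1 : Nat) : Int) + 1] := by
        have h := PySem.List.pyRange_one_succ_right
          (a := 2) (b := ((M + 1 : Nat) : Int) + 1) (by push_cast; omega)
        have harg : (((M + 2 : Nat) : Int) + 1) = (((M + 1 : Nat) : Int) + 1 + 1) := by
          push_cast; ring
        rw [harg, h]
      rw [hsplit, List.foldl_append, ih]
      simp only [Jn, List.foldl]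
      congr 1

-- Index transfer through one rotate+delete step of A: the element of the new list at
-- index jn is the element of the old list at the altStep-transferred index.
theorem step_transfer (arr : List Int) (k yn jn : Nat)
    (hlen : arr.length = k + 2) (hj : jn ≤ k) :
    ((arr.getLastD 0 :: arr.dropLast).eraseIdx yn)[jn]?
      = arr[(if jn < yn then (if jn = 0 then k + 1 else jn - 1) else jn)]? := by
  rw [List.getElem?_eraseIdx]
  by_cases h1 : jn < yn
  · rw [if_pos h1, if_pos h1]
    rcases Nat.eq_zero_or_pos jn with h2 | h2
    · -- jn = 0 : head of the rotated list = last element of arr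
      subst h2
      have hk : k + 1 < arr.length := by omega
      rw [if_pos rfl, List.getElem?_cons_zero, List.getElem?_eq_getElem hk,
          List.getLastD_eq_getLast?, List.getLast?_eq_getElem?, hlen]
      rw [show k + 2 - 1 = k + 1 from rfl, List.getElem?_eq_getElem hk]
      rfl
    · -- 0 < jn < yn : rotated[jn] = arr[jn - 1]
      rw [if_neg (Nat.pos_iff_ne_zero.mp h2)]
      obtain ⟨i, rfl⟩ : ∃ i, jn = i + 1 := ⟨jn - 1, by omega⟩
      rw [List.getElem?_cons_succ, List.getElem?_dropLast, if_pos (by omega)]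
      simp
  · -- jn ≥ yn : rotated[jn + 1] = arr[jn]
    rw [if_neg h1, if_neg h1, List.getElem?_cons_succ, List.getElem?_dropLast,
        if_pos (by omega)]

-- Main loop invariant: A's loop starting from state (arr, v1, v1, v3) returns the element
-- of arr at the index computed by B's recurrence Jn with n = 2*v1 + 2*|arr| - v3 - 1.
theorem rotLoop_eq_Jn (m : Nat) : ∀ (arr : List Int) (v1 v3 : Int), arr.length = m → arr ≠ [] →
    v3 - 2 * v1 ≤ (m : Int) - 1 →
    rotLoop arr v1 v1 v3 = (PySem.List.pyGet? arr (Jn (2 * v1 + 2 * (m : Int) - v3 - 1) m)).getD 0 := by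
  induction m using Nat.strong_induction_on with
  | _ m IH =>
    intro arr v1 v3 hlen hne hy
    match m, hlen with
    | 0, hlen => exact absurd (List.length_eq_zero_iff.mp hlen) hne
    | 1, hlen =>
      rw [rotLoop, dif_pos hlen]
      simp [Jn]
    | (k + 2), hlen =>
      have hL1 : ¬ arr.length = 1 := by omega
      -- the clamped pop index y and its bounds
      set y : Int := if v3 - v1 - v1 < 0 then 0 else v3 - v1 - v1 with hydef
      have hy0 : 0 ≤ y := by rw [hydef]; split_ifs <;> omega
      have hyk : y ≤ (k : Int) + 1 := by rw [hydef]; split_ifs <;> push_cast at hy ⊢ <;> omega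
      have hguard : y.toNat < arr.length := by omega
      rw [rotLoop, dif_neg hL1, dif_neg hne]
      simp only [← hydef, dif_pos hguard]
      set S := ((arr.getLastD 0 :: arr.dropLast).eraseIdx y.toNat) with hSdef
      have hSlen : S.length = k + 1 := by
        rw [hSdef, List.length_eraseIdx]
        simp only [List.length_cons, List.length_dropLast, hlen]
        split_ifs <;> omega
      have hSne : S ≠ [] := by intro h; simp [h] at hSlen
      have ih := IH (k + 1) (by omega) S (v1 + 1) v3 hSlen hSne (by push_cast at hy ⊢; omega)
      rw [ih]
      -- both index recurrences carry the same constant n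
      have hn : 2 * (v1 + 1) + 2 * ((k + 1 : Nat) : Int) - v3 - 1
          = 2 * v1 + 2 * ((k + 2 : Nat) : Int) - v3 - 1 := by push_cast; ring
      rw [hn]
      set n : Int := 2 * v1 + 2 * ((k + 2 : Nat) : Int) - v3 - 1 with hndef
      set j : Int := Jn n (k + 1) with hjdef
      have hjb := Jn_bounds n (k + 1) (by omega)
      rw [← hjdef] at hjb
      have hjk : j ≤ (k : Int) := by push_cast at hjb; omega
      -- unfold one step of Jn: its pop index coincides with y
      have hJstep : Jn n (k + 2)
          = if j < y then (if j = 0 then ((k : Int) + 2) - 1 else j - 1) else j := by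
        have hyy : (if 2 * ((k : Int) + 2) - n - 1 < 0 then 0 else 2 * ((k : Int) + 2) - n - 1)
            = y := by
          rw [hndef, hydef]
          push_cast
          split_ifs <;> omega
        simp only [Jn, altStep, ← hjdef]
        rw [hyy]
      rw [hJstep]
      -- turn both pyGet? into getElem? and transfer the index through the step
      set t : Int := if j < y then (if j = 0 then ((k : Int) + 2) - 1 else j - 1) else j with htdef
      have ht0 : 0 ≤ t := by rw [htdef]; split_ifs <;> omega
      rw [PySem.List.pyGet?_of_nonneg S hjb.1, PySem.List.pyGet?_of_nonneg arr ht0]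
      have hidx : t.toNat
          = (if j.toNat < y.toNat then (if j.toNat = 0 then k + 1 else j.toNat - 1) else j.toNat) := by
        rw [htdef]; split_ifs <;> omega
      rw [hidx, hSdef, step_transfer arr k y.toNat j.toNat hlen (by omega)]

-- ===== VERDICT (by name: the statement is the Claim_ definition above) =====
theorem rotateDelete_spec : Claim_equal_rotateDelete := by
  intro arr _hdom hpre
  have hm : 1 ≤ arr.length := List.length_pos_iff.mpr hpre
  have key := rotLoop_eq_Jn arr.length arr 0 ((arr.length : Int) - 1) rfl hpre (by omega)
  have hn : (2 * (0 : Int) + 2 * (arr.length : Int) - ((arr.length : Int) - 1) - 1)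
      = (arr.length : Int) := by ring
  rw [hn] at key
  unfold Spec_rotateDelete rotateDelete rotateDelete_alt
  show rotLoop arr 0 0 ((arr.length : Int) - 1)
      = (PySem.List.pyGet? arr
          ((PySem.List.pyRange 2 ((arr.length : Int) + 1) 1).foldl (altStep (arr.length : Int)) 0)).getD 0
  rw [fold_eq_Jn _ _ hm, key]
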